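-- pv_equiv track=rewrite | github.com/Novel-Transformation-for-You/service | module/input_process.py | NML
-- ===== SOURCE A (Python) =====
-- def NML(seg_sents, mention_positions, ws):
--     """
--     Nearest Mention Location
--     """
--     def word_dist(pos):
--         """
--         The word level distance between quote and the mention position
--         """
--         if pos[0] == ws:
--             w_d = ws * 2
--         elif pos[0] < ws:
--             w_d = sum(len(
--                 sent) for sent in seg_sents[pos[0] + 1:ws]) + len(seg_sents[pos[0]][pos[1] + 1:])
--         else:
--             w_d = sum(
--                 len(sent) for sent in seg_sents[ws + 1:pos[0]]) + len(seg_sents[pos[0]][:pos[1]])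
--         return w_d
--
--     sorted_positions = sorted(mention_positions, key=lambda x: word_dist(x))
--
--     return sorted_positions[0]
-- ===== SOURCE B (Python) =====
-- def NML(seg_sents, mention_positions, ws):
--     """
--     Nearest Mention Location: a prefix table of sentence lengths gives every
--     cross-sentence word count in O(1), and one min() pass replaces the sort.
--     """
--     n = len(seg_sents)
--     prefix = [0]
--     for sent in seg_sents:
--         prefix.append(prefix[-1] + len(sent))
--
--     def span_words(a, b):
--         """sum(len(s) for s in seg_sents[a:b]) in O(1) via the prefix table"""
--         a = a + n if a < 0 else a
--         b = b + n if b < 0 else b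
--         a = min(max(a, 0), n)
--         b = min(max(b, 0), n)
--         return prefix[b] - prefix[a] if a < b else 0
--
--     def word_dist(pos):
--         i, j = pos
--         if i == ws:
--             return ws * 2
--         if i < ws:
--             return span_words(i + 1, ws) + len(seg_sents[i][j + 1:])
--         return span_words(ws + 1, i) + len(seg_sents[i][:j])
--
--     return min(mention_positions, key=word_dist)
-- ===== Notes on version B (the rewrite author's own statement) =====
-- stated objective: alternative
-- what changed: B precomputes one prefix table of sentence lengths so every cross-sentence word count is a subtraction instead of summing a fresh slice per mention, and takes the first minimum with a single min() pass instead of sorting the whole mention list.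
import Mathlib
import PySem

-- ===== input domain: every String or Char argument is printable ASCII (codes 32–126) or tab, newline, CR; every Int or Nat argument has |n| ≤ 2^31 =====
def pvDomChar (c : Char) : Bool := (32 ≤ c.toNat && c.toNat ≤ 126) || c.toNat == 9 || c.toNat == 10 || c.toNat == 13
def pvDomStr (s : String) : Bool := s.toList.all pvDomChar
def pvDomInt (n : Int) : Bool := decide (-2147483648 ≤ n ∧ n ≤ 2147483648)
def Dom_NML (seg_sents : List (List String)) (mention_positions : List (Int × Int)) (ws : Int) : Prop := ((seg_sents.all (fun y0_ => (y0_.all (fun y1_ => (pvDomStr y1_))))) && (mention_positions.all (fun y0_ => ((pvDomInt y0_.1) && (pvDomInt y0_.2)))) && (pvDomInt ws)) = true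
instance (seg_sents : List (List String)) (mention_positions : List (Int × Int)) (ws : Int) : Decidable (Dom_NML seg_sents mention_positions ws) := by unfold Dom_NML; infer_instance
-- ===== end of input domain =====

-- B replaces A's per-mention slice sums by one prefix table of sentence lengths (cross-sentence
-- word counts become one subtraction) and A's full sort by a single min() pass; objective: alternative.

-- ===== PORT A =====
-- word_dist: seg_sents[pos[0]] raises IndexError when pos[0] is out of range (excluded by
-- Pre_NML); ported with pyGetD default [].
def NML_wd (seg_sents : List (List String)) (ws : Int) (pos : Int × Int) : Int :=
  if pos.1 = ws then ws * 2
  else if pos.1 < ws then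
    ((PySem.List.slice seg_sents (some (pos.1 + 1)) (some ws)).map (fun sent => (sent.length : Int))).sum
      + ((PySem.List.slice (PySem.List.pyGetD seg_sents pos.1 []) (some (pos.2 + 1)) none).length : Int)
  else
    ((PySem.List.slice seg_sents (some (ws + 1)) (some pos.1)).map (fun sent => (sent.length : Int))).sum
      + ((PySem.List.slice (PySem.List.pyGetD seg_sents pos.1 []) none (some pos.2)).length : Int)

-- sorted_positions[0] raises IndexError on an empty list (excluded by Pre_NML); default (0, 0).
def NML (seg_sents : List (List String)) (mention_positions : List (Int × Int)) (ws : Int) : Int × Int :=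
  PySem.List.pyGetD (PySem.List.sorted mention_positions (fun x => NML_wd seg_sents ws x)) 0 (0, 0)

-- ===== PORT B =====
-- prefix = [0]; for sent in seg_sents: prefix.append(prefix[-1] + len(sent))
def NML_alt_prefix (seg_sents : List (List String)) : List Int :=
  seg_sents.foldl (fun p sent => p ++ [PySem.List.pyGetD p (-1) 0 + (sent.length : Int)]) [0]

-- span_words(a, b): sum(len(s) for s in seg_sents[a:b]) in O(1) via the prefix table
def NML_alt_span (pre : List Int) (n : Int) (a b : Int) : Int :=
  let a1 := if a < 0 then a + n else a
  let b1 := if b < 0 then b + n else b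
  let a2 := min (max a1 0) n
  let b2 := min (max b1 0) n
  if a2 < b2 then PySem.List.pyGetD pre b2 0 - PySem.List.pyGetD pre a2 0 else 0

-- word_dist: seg_sents[pos[0]] raises IndexError when pos[0] is out of range (excluded by
-- Pre_NML); ported with pyGetD default [].
def NML_alt_wd (seg_sents : List (List String)) (pre : List Int) (n ws : Int) (pos : Int × Int) : Int :=
  if pos.1 = ws then ws * 2
  else if pos.1 < ws then
    NML_alt_span pre n (pos.1 + 1) ws
      + ((PySem.List.slice (PySem.List.pyGetD seg_sents pos.1 []) (some (pos.2 + 1)) none).length : Int)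
  else
    NML_alt_span pre n (ws + 1) pos.1
      + ((PySem.List.slice (PySem.List.pyGetD seg_sents pos.1 []) none (some pos.2)).length : Int)

-- min(mention_positions, key=word_dist) raises ValueError on an empty list (excluded by
-- Pre_NML); default (0, 0).
def NML_alt (seg_sents : List (List String)) (mention_positions : List (Int × Int)) (ws : Int) : Int × Int :=
  let n : Int := seg_sents.length
  let pre := NML_alt_prefix seg_sents
  (PySem.List.min? mention_positions (fun pos => NML_alt_wd seg_sents pre n ws pos)).getD (0, 0)

-- ===== PRECONDITION & SPEC =====
-- Pre_NML excludes exactly the inputs on which A raises: an empty mention list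
-- (sorted_positions[0] raises IndexError) and a mention whose sentence index is out of range
-- for seg_sents and differs from ws (seg_sents[pos[0]] raises IndexError; when pos[0] == ws
-- the index is never used); B raises on the same inputs.
def Pre_NML (seg_sents : List (List String)) (mention_positions : List (Int × Int)) (ws : Int) : Prop :=
  mention_positions ≠ [] ∧
    ∀ p ∈ mention_positions, p.1 = ws ∨ (-(seg_sents.length : Int) ≤ p.1 ∧ p.1 < (seg_sents.length : Int))
instance (seg_sents : List (List String)) (mention_positions : List (Int × Int)) (ws : Int) : Decidable (Pre_NML seg_sents mention_positions ws) := by unfold Pre_NML; infer_instance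

def pvWitness_NML : List (List String) × (List (Int × Int)) × Int := ([["a"], ["b", "c"]], [(0, 0), (1, 1)], 1)

def Spec_NML (seg_sents : List (List String)) (mention_positions : List (Int × Int)) (ws : Int) (out : Int × Int) : Prop := out = NML_alt seg_sents mention_positions ws
instance (seg_sents : List (List String)) (mention_positions : List (Int × Int)) (ws : Int) (out : Int × Int) : Decidable (Spec_NML seg_sents mention_positions ws out) := by unfold Spec_NML; infer_instance

-- ===== CLAIM (what is proved, stated in full; the proofs are below) =====
def Claim_equal_NML : Prop := ∀ (seg_sents : List (List String)) (mention_positions : List (Int × Int)) (ws : Int), Dom_NML seg_sents mention_positions ws → Pre_NML seg_sents mention_positions ws → Spec_NML seg_sents mention_positions ws (NML seg_sents mention_positions ws)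

-- ===== LEMMAS AND PROOFS =====

-- total word count of a list of sentences, as Python's sum(len(sent) for sent in …)
def pvSumLen (ls : List (List String)) : Int := (ls.map (fun s => (s.length : Int))).sum

-- xs[0] with default = head?.getD
theorem pyGetD_zero_headD {α : Type} (xs : List α) (d : α) :
    PySem.List.pyGetD xs 0 d = xs.head?.getD d := by
  cases xs <;> simp [PySem.List.pyGetD, PySem.List.pyGet?, PySem.List.pyIdx?]

-- head of one stable insertion step
theorem head?_insertBy {α : Type} (key : α → Int) (x : α) (l : List α) :
    (PySem.List.insertBy (fun a b => decide (key a < key b)) x l).head? =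
      some (match l.head? with
            | none => x
            | some m => if key x < key m then x else m) := by
  cases l with
  | nil => simp [PySem.List.insertBy]
  | cons y ys =>
    simp only [PySem.List.insertBy, List.head?]
    split_ifs with h <;> simp_all

-- head of Python's stable sort = Python's min with the same key (first minimum)
theorem head?_sorted_eq_min? {α : Type} (xs : List α) (key : α → Int) :
    (PySem.List.sorted xs key false).head? = PySem.List.min? xs key := by
  induction xs using List.reverseRecOn with
  | nil => simp [PySem.List.sorted, PySem.List.min?]
  | append_singleton t x ih =>
    simp only [PySem.List.sorted, PySem.List.min?, List.foldl_append, List.foldl_cons,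
      List.foldl_nil, if_neg (by decide : ¬ (false = true))] at *
    rw [head?_insertBy, ← ih]
    cases h : (List.foldl (fun acc x => PySem.List.insertBy (fun a b => decide (key a < key b)) x acc) [] t).head? <;> simp <;> split_ifs <;> simp

theorem min?_congr {α : Type} (xs : List α) (f g : α → Int)
    (h : ∀ x, f x = g x) : PySem.List.min? xs f = PySem.List.min? xs g := by
  have : f = g := funext h
  rw [this]

-- B's prefix list is the table of partial word counts
theorem prefix_eq (ls : List (List String)) :
    NML_alt_prefix ls = (List.range (ls.length + 1)).map (fun k => pvSumLen (ls.take k)) := by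
  induction ls using List.reverseRecOn with
  | nil => simp [NML_alt_prefix, pvSumLen]
  | append_singleton t s ih =>
    unfold NML_alt_prefix at *
    rw [List.foldl_append, ih]
    simp only [List.foldl_cons, List.foldl_nil]
    have hlast : PySem.List.pyGetD ((List.range (t.length + 1)).map (fun k => pvSumLen (List.take k t))) (-1) 0
        = pvSumLen t := by
      rw [PySem.List.pyGetD]
      simp [PySem.List.pyGet?, PySem.List.pyIdx?]
    rw [hlast]
    rw [List.length_append, List.length_singleton, List.range_succ (n := t.length + 1), List.map_append]
    congr 1
    · apply List.map_congr_left
      intro k hk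
      rw [List.mem_range] at hk
      rw [List.take_append_of_le_length (by omega)]
    · simp [pvSumLen]

theorem prefix_get (ls : List (List String)) (k : Nat) (hk : k ≤ ls.length) :
    PySem.List.pyGetD (NML_alt_prefix ls) (k : Int) 0 = pvSumLen (ls.take k) := by
  rw [prefix_eq, PySem.List.pyGetD_eq_getElem _ _ (by omega) (by simp; omega)]
  simp

theorem sumLen_take_sub (ls : List (List String)) (a b : Nat) (hab : a ≤ b) :
    pvSumLen ((ls.drop a).take (b - a)) = pvSumLen (ls.take b) - pvSumLen (ls.take a) := by
  have : ls.take b = ls.take a ++ (ls.drop a).take (b - a) := by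
    rw [← List.take_add]; congr 1; omega
  rw [this]
  simp [pvSumLen]

theorem clampIdx_le (n : Nat) (k : Int) : PySem.List.clampIdx n k ≤ n := by
  simp only [PySem.List.clampIdx]; split_ifs <;> omega

-- A's slice sum over seg_sents[a:b] = B's span_words(a, b)
theorem span_eq (seg : List (List String)) (a b : Int) :
    ((PySem.List.slice seg (some a) (some b)).map (fun s => (s.length : Int))).sum
      = NML_alt_span (NML_alt_prefix seg) (seg.length : Int) a b := by
  set n := seg.length with hn
  have ha : (min (max (if a < 0 then a + (n : Int) else a) 0) (n : Int))
      = ((PySem.List.clampIdx n a : Nat) : Int) := by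
    simp only [PySem.List.clampIdx]; split_ifs <;> omega
  have hb : (min (max (if b < 0 then b + (n : Int) else b) 0) (n : Int))
      = ((PySem.List.clampIdx n b : Nat) : Int) := by
    simp only [PySem.List.clampIdx]; split_ifs <;> omega
  unfold NML_alt_span
  simp only [ha, hb]
  have hsl : PySem.List.slice seg (some a) (some b)
      = (seg.drop (PySem.List.clampIdx n a)).take (PySem.List.clampIdx n b - PySem.List.clampIdx n a) := by
    simp [PySem.List.slice, ← hn]
  rw [hsl]
  by_cases h : PySem.List.clampIdx n a < PySem.List.clampIdx n b
  · rw [if_pos (by exact_mod_cast h)]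
    rw [prefix_get _ _ (clampIdx_le n b), prefix_get _ _ (clampIdx_le n a)]
    exact sumLen_take_sub seg _ _ (by omega)
  · rw [if_neg (by exact_mod_cast h)]
    rw [show PySem.List.clampIdx n b - PySem.List.clampIdx n a = 0 by omega]
    simp

-- the two word-distance keys agree on every position
theorem wd_eq (seg_sents : List (List String)) (ws : Int) (p : Int × Int) :
    NML_wd seg_sents ws p =
      NML_alt_wd seg_sents (NML_alt_prefix seg_sents) (seg_sents.length : Int) ws p := by
  obtain ⟨i, j⟩ := p
  unfold NML_wd NML_alt_wd
  dsimp only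
  by_cases hiw : i = ws
  · simp [hiw]
  · by_cases hlt : i < ws
    · rw [if_neg hiw, if_neg hiw, if_pos hlt, if_pos hlt, span_eq]
    · rw [if_neg hiw, if_neg hiw, if_neg hlt, if_neg hlt, span_eq]

-- ===== VERDICT (by name: the statement is the Claim_ definition above) =====
theorem NML_spec : Claim_equal_NML := by
  intro seg mp ws _hdom _hpre
  unfold Spec_NML NML NML_alt
  rw [pyGetD_zero_headD, head?_sorted_eq_min?]
  rw [min?_congr mp _ _ (fun p => wd_eq seg ws p)]
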